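-- pv_equiv track=rewrite | github.com/AdeleHardie/adventofcode | 2024/day_03.py | part_1
-- ===== SOURCE A (Python) =====
-- def part_1(contents):
--     mul = 0
--     # split input
--     contents = contents[0].split('mul(')
--
--     for entry in contents:
--         # remove second bracket
--         if ')' not in entry:
--             continue
--         numbers = entry.split(')')[0]
--
--         # split into numbers
--         if ',' not in numbers:
--             continue
--         numbers = numbers.split(',')
--
--         # check only 2 parts
--         if len(numbers) != 2:
--             continue
--         # check both numbers
--         if not (numbers[0].isnumeric() and numbers[1].isnumeric()):
--             continue
--
--         mul += int(numbers[0]) * int(numbers[1])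
--
--     return mul
-- ===== SOURCE B (Python) =====
-- def _parse_num(s, i):
--     # read a run of decimal digits starting at i; None if there is none
--     j = i
--     while j < len(s) and s[j].isdigit():
--         j += 1
--     if j == i:
--         return None
--     return int(s[i:j]), j
--
--
-- def _parse_args(s, i):
--     # parse "<digits>,<digits>)" at position i; return (product, end) or None
--     r = _parse_num(s, i)
--     if r is None:
--         return None
--     a, i = r
--     if i >= len(s) or s[i] != ',':
--         return None
--     r = _parse_num(s, i + 1)
--     if r is None:
--         return None
--     b, i = r
--     if i >= len(s) or s[i] != ')':
--         return None
--     return a * b, i + 1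
--
--
-- def part_1(contents):
--     # single left-to-right scan for 'mul(<digits>,<digits>)'
--     s = contents[0]
--     total = 0
--     i = 0
--     n = len(s)
--     while i < n:
--         if s.startswith('mul(', i):
--             r = _parse_args(s, i + 4)
--             if r is not None:
--                 v, j = r
--                 total += v
--                 i = j
--                 continue
--         i += 1
--     return total
-- ===== Notes on version B (the rewrite author's own statement) =====
-- stated objective: alternative
-- what changed: B replaces A's split('mul(') pass with nested split(')')/split(',') and isnumeric checks per piece by a single left-to-right character scan that parses 'mul(<digits>,<digits>)' in place with a small recursive-descent parser.
-- intended difference: On inputs whose first string begins with '<digits>,<digits>)' with a nonzero product (no 'mul(' before it), A also adds that product because str.split yields the text before the first separator as an entry, e.g. A(['1,2)']) = 2, while B returns 0 there; B's value is intended since no 'mul(' call precedes those numbers. — e.g. on part_1(["1,2)"]): A returns 2, B returns 0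
import Mathlib
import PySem

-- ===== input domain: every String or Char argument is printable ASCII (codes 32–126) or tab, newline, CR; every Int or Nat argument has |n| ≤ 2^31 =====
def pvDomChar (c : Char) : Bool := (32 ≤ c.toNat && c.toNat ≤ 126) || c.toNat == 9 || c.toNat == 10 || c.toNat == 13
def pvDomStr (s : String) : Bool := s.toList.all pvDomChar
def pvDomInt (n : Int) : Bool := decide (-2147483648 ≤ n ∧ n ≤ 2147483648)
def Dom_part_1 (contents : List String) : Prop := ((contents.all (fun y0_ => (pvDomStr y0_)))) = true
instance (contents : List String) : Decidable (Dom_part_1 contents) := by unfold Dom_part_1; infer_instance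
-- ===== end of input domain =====

-- B replaces A's split-chain by a single character scan with a small in-place parser (same cost);
-- on strings whose first piece already looks like '<digits>,<digits>)' A counts it (split quirk), B does not (see D_part_1).

-- ===== PORT A =====
-- Python's isnumeric is ported as PySem.Chars.strIsdigit: they coincide on the ASCII domain Dom_part_1,
-- and there int() always succeeds on the guarded all-digit strings, so .getD 0 never supplies its default.
def part_1 (contents : List String) : Int :=
  match PySem.List.pyGet? contents 0 with
  | none => 0   -- Python raises IndexError here; excluded by Pre_part_1
  | some s =>
    (PySem.Chars.splitOn s.toList "mul(".toList).foldl (fun mul entry =>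
      if PySem.Chars.isIn [')'] entry = false then mul
      else
        let numbers := (PySem.Chars.splitOn entry [')']).headD []
        if PySem.Chars.isIn [','] numbers = false then mul
        else
          let ns := PySem.Chars.splitOn numbers [',']
          if ns.length ≠ 2 then mul
          else if !(PySem.Chars.strIsdigit (ns.headD []) && PySem.Chars.strIsdigit (ns.getD 1 [])) then mul
          else mul + ((PySem.Int.ofChars? (ns.headD [])).getD 0) * ((PySem.Int.ofChars? (ns.getD 1 [])).getD 0)) 0

-- ===== PORT B =====
-- _parse_num: the digit run is cs.takeWhile isdigit, the rest cs.dropWhile isdigit (= s[j:] at the loop's end)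
def pvParseNum (cs : List Char) : Option (Int × List Char) :=
  if (cs.takeWhile PySem.Chars.isdigit).isEmpty then none
  else some ((PySem.Int.ofChars? (cs.takeWhile PySem.Chars.isdigit)).getD 0,
             cs.dropWhile PySem.Chars.isdigit)

def pvParseArgs (cs : List Char) : Option (Int × List Char) :=
  match pvParseNum cs with
  | none => none
  | some (a, r1) =>
    match r1 with
    | ',' :: r2 =>
      (match pvParseNum r2 with
       | none => none
       | some (b, r3) =>
         (match r3 with
          | ')' :: r4 => some (a * b, r4)
          | _ => none))
    | _ => none

-- termination helper for pvScan (cited in decreasing_by)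
theorem pvParseNum_length {cs : List Char} {v : Int} {r : List Char}
    (h : pvParseNum cs = some (v, r)) : r.length < cs.length := by
  unfold pvParseNum at h
  split at h
  · cases h
  · rename_i hne
    simp only [Option.some.injEq, Prod.mk.injEq] at h
    obtain ⟨-, hr⟩ := h
    subst hr
    have hlen := congrArg List.length (List.takeWhile_append_dropWhile (p := PySem.Chars.isdigit) (l := cs))
    have hpos : 0 < (cs.takeWhile PySem.Chars.isdigit).length := by
      cases hcs : cs.takeWhile PySem.Chars.isdigit with
      | nil => rw [hcs] at hne; simp at hne
      | cons x xs => simp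
    simp only [List.length_append] at hlen
    omega

theorem pvParseArgs_length {cs : List Char} {v : Int} {r : List Char}
    (h : pvParseArgs cs = some (v, r)) : r.length < cs.length := by
  unfold pvParseArgs at h
  split at h
  · cases h
  · rename_i a r1 hp1
    split at h
    · rename_i r2
      split at h
      · cases h
      · rename_i b r3 hp2
        split at h
        · rename_i r4
          simp only [Option.some.injEq, Prod.mk.injEq] at h
          obtain ⟨-, hr⟩ := h
          subst hr
          have h1 := pvParseNum_length hp1
          have h2 := pvParseNum_length hp2
          simp only [List.length_cons] at *
          omega
        · cases h
    · cases h

def pvScan : List Char → Int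
  | [] => 0
  | c :: rest =>
    if ['m', 'u', 'l', '('].isPrefixOf (c :: rest) then
      match h : pvParseArgs (rest.drop 3) with
      | some (v, r) => v + pvScan r
      | none => pvScan rest
    else pvScan rest
termination_by cs => cs.length
decreasing_by
  · have h1 := pvParseArgs_length h
    have h2 : (rest.drop 3).length ≤ rest.length := by
      simp [List.length_drop]
    simp only [List.length_cons]
    omega
  · simp
  · simp

def part_1_alt (contents : List String) : Int :=
  match contents with
  | [] => 0   -- Python raises IndexError here; excluded by Pre_part_1
  | s :: _ => pvScan s.toList

-- ===== PRECONDITION & SPEC =====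
-- Pre_ excludes only the empty list, on which both Pythons raise IndexError (contents[0]).
def Pre_part_1 (contents : List String) : Prop := contents ≠ []
instance (contents : List String) : Decidable (Pre_part_1 contents) := by unfold Pre_part_1; infer_instance
def pvWitness_part_1 : List String := ["xmul(2,3)y"]

-- does the string start with '<digits>,<digits>)'? (pattern test for D_part_1)
def pvMatchAB (cs : List Char) : Bool :=
  let r := cs.dropWhile PySem.Chars.isdigit
  (r.headD ' ' == ',') && ((r.tail.dropWhile PySem.Chars.isdigit).headD ' ' == ')') &&
    ((PySem.Int.ofChars? (cs.takeWhile PySem.Chars.isdigit)).getD 0 *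
      (PySem.Int.ofChars? (r.tail.takeWhile PySem.Chars.isdigit)).getD 0 != 0)

-- On inputs whose first string begins with '<digits>,<digits>)' with a nonzero product, A also adds
-- that product (str.split yields the text before the first 'mul(' as an entry), e.g. A(["1,2)"]) = 2;
-- B returns 0 there, the intended value, since no 'mul(' precedes those numbers.
def D_part_1 (contents : List String) : Prop :=
  contents ≠ [] ∧ pvMatchAB (contents.headD "").toList = true
instance (contents : List String) : Decidable (D_part_1 contents) := by unfold D_part_1; infer_instance

def Spec_part_1 (contents : List String) (out : Int) : Prop := ¬ D_part_1 contents → out = part_1_alt contents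
instance (contents : List String) (out : Int) : Decidable (Spec_part_1 contents out) := by unfold Spec_part_1; infer_instance

def pvDiffWitness_part_1 : List String := ["1,2)"]
def pvDiffWitnessOut_part_1 : Int × Int := (2, 0)

-- ===== CLAIM (what is proved, stated in full; the proofs are below) =====
def Claim_unchanged_part_1 : Prop := ∀ (contents : List String), Dom_part_1 contents → Pre_part_1 contents → Spec_part_1 contents (part_1 contents)
def Claim_changed_part_1 : Prop := Dom_part_1 (pvDiffWitness_part_1) ∧ Pre_part_1 (pvDiffWitness_part_1) ∧ D_part_1 (pvDiffWitness_part_1) ∧ part_1 (pvDiffWitness_part_1) = pvDiffWitnessOut_part_1.1 ∧ part_1_alt (pvDiffWitness_part_1) = pvDiffWitnessOut_part_1.2 ∧ pvDiffWitnessOut_part_1.1 ≠ pvDiffWitnessOut_part_1.2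
def Claim_exact_part_1 : Prop := ∀ (contents : List String), Dom_part_1 contents → Pre_part_1 contents → D_part_1 contents → part_1 contents ≠ part_1_alt contents

-- ===== LEMMAS AND PROOFS =====

-- a direct recursive description of Python's str.split, used only by the proofs
def pvSplitG (sep : List Char) : List Char → List (List Char)
  | [] => [[]]
  | c :: rest =>
    if sep.isPrefixOf (c :: rest) && !sep.isEmpty then
      [] :: pvSplitG sep (List.drop sep.length (c :: rest))
    else
      match pvSplitG sep rest with
      | [] => [[c]]
      | p :: ps => (c :: p) :: ps
termination_by l => l.length
decreasing_by
  · rename_i h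
    simp only [Bool.and_eq_true, Bool.not_eq_true', List.isEmpty_eq_false_iff] at h
    have hpos : 0 < sep.length := List.length_pos_iff.mpr h.2
    simp only [List.length_drop, List.length_cons]
    omega
  · simp

theorem pvSplitG_ne_nil (sep l) : pvSplitG sep l ≠ [] := by
  unfold pvSplitG
  cases l with
  | nil => simp
  | cons c rest =>
    split
    · simp
    · split
      · simp
      · split <;> simp

theorem pvSplitG_decomp (sep l) :
    pvSplitG sep l = (pvSplitG sep l).headD [] :: (pvSplitG sep l).tail := by
  cases h : pvSplitG sep l with
  | nil => exact absurd h (pvSplitG_ne_nil sep l)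
  | cons p ps => simp

theorem splitOn_go_eq (sep : List Char) (hsep : sep ≠ []) :
    ∀ (fuel : Nat) (l cur : List Char) (acc : List (List Char)), l.length < fuel →
      PySem.Chars.splitOn.go sep fuel l cur acc
        = acc.reverse ++ ((cur.reverse ++ (pvSplitG sep l).headD []) :: (pvSplitG sep l).tail) := by
  intro fuel
  induction fuel with
  | zero => intro l cur acc h; omega
  | succ f ih =>
    intro l cur acc h
    cases l with
    | nil =>
      rw [PySem.Chars.splitOn.go]
      · simp [pvSplitG]
      · omega
    | cons c rest =>
      rw [PySem.Chars.splitOn.go]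
      by_cases hp : sep.isPrefixOf (c :: rest) = true
      · rw [if_pos hp]
        have hlen : (List.drop sep.length (c :: rest)).length < f := by
          have : 0 < sep.length := List.length_pos_iff.mpr hsep
          simp only [List.length_drop, List.length_cons] at *
          omega
        rw [ih _ _ _ hlen]
        have hsp : pvSplitG sep (c :: rest)
            = [] :: pvSplitG sep (List.drop sep.length (c :: rest)) := by
          rw [pvSplitG]
          rw [if_pos (by simp [hp, List.isEmpty_eq_false_iff.mpr hsep])]
        rw [hsp]
        rw [pvSplitG_decomp sep (List.drop sep.length (c :: rest))]
        simp
      · rw [if_neg hp]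
        have hlen : rest.length < f := by simp at h; omega
        rw [ih _ _ _ hlen]
        have hsp : pvSplitG sep (c :: rest)
            = (c :: (pvSplitG sep rest).headD []) :: (pvSplitG sep rest).tail := by
          rw [pvSplitG]
          rw [if_neg (by simp [hp])]
          rw [pvSplitG_decomp sep rest]
          simp
        rw [hsp]
        simp

theorem splitOn_eq (s sep : List Char) (hsep : sep ≠ []) :
    PySem.Chars.splitOn s sep = pvSplitG sep s := by
  unfold PySem.Chars.splitOn
  rw [splitOn_go_eq sep hsep (s.length + 1) s [] [] (by omega)]
  simpa using (pvSplitG_decomp sep s).symm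



theorem pvSplitG_cons_pos (sep : List Char) (x : Char) (rest : List Char)
    (h : sep.isPrefixOf (x :: rest) = true) (hne : sep ≠ []) :
    pvSplitG sep (x :: rest) = [] :: pvSplitG sep (List.drop sep.length (x :: rest)) := by
  rw [pvSplitG]
  rw [if_pos (by simp [h, List.isEmpty_eq_false_iff.mpr hne])]

theorem pvSplitG_cons_neg (sep : List Char) (x : Char) (rest : List Char)
    (h : (sep.isPrefixOf (x :: rest) && !sep.isEmpty) = false) :
    pvSplitG sep (x :: rest)
      = (x :: (pvSplitG sep rest).headD []) :: (pvSplitG sep rest).tail := by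
  rw [pvSplitG]
  rw [if_neg (by simp [h])]
  rw [pvSplitG_decomp sep rest]
  simp

theorem pvChar_cons_self (c : Char) (rest : List Char) :
    pvSplitG [c] (c :: rest) = [] :: pvSplitG [c] rest := by
  rw [pvSplitG_cons_pos [c] c rest (by simp [List.isPrefixOf]) (by simp)]
  simp

theorem pvChar_cons_ne (c x : Char) (rest : List Char) (h : x ≠ c) :
    pvSplitG [c] (x :: rest)
      = (x :: (pvSplitG [c] rest).headD []) :: (pvSplitG [c] rest).tail := by
  apply pvSplitG_cons_neg
  simp [List.isPrefixOf]
  exact fun e => absurd e.symm h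

theorem pvChar_head (c : Char) (l : List Char) :
    (pvSplitG [c] l).headD [] = l.takeWhile (· != c) := by
  induction l with
  | nil => simp [pvSplitG]
  | cons x rest ih =>
    by_cases hx : x = c
    · subst hx
      rw [pvChar_cons_self]
      simp
    · rw [pvChar_cons_ne c x rest hx]
      simp [List.takeWhile_cons, hx]
      simpa using ih

theorem pvChar_no_mem (c : Char) (l : List Char) (h : c ∉ l) :
    pvSplitG [c] l = [l] := by
  induction l with
  | nil => simp [pvSplitG]
  | cons x rest ih =>
    have hx : x ≠ c := fun e => h (e ▸ List.mem_cons_self)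
    rw [pvChar_cons_ne c x rest hx]
    rw [ih (fun hm => h (List.mem_cons_of_mem _ hm))]
    simp

theorem pvChar_append (c : Char) (a b : List Char) (h : c ∉ a) :
    pvSplitG [c] (a ++ c :: b) = a :: pvSplitG [c] b := by
  induction a with
  | nil =>
    simp only [List.nil_append]
    exact pvChar_cons_self c b
  | cons x a' ih =>
    have hx : x ≠ c := fun e => h (e ▸ List.mem_cons_self)
    rw [List.cons_append, pvChar_cons_ne c x (a' ++ c :: b) hx]
    rw [ih (fun hm => h (List.mem_cons_of_mem _ hm))]
    simp

-- rebuild the string from its single-character split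
def pvJoinC (c : Char) : List (List Char) → List Char
  | [] => []
  | [p] => p
  | p :: ps => p ++ c :: pvJoinC c ps

theorem pvChar_parts (c : Char) : ∀ n : List Char,
    (∀ p ∈ pvSplitG [c] n, c ∉ p) ∧ pvJoinC c (pvSplitG [c] n) = n := by
  intro n
  induction n with
  | nil => simp [pvSplitG, pvJoinC]
  | cons x rest ih =>
    by_cases hx : x = c
    · subst hx
      rw [pvChar_cons_self]
      obtain ⟨ih1, ih2⟩ := ih
      constructor
      · intro p hp
        rcases List.mem_cons.mp hp with h | h
        · subst h; simp
        · exact ih1 p h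
      · rw [pvSplitG_decomp [x] rest] at ih2 ⊢
        simp only [pvJoinC]
        rw [ih2]
        simp
    · rw [pvChar_cons_ne c x rest hx]
      obtain ⟨ih1, ih2⟩ := ih
      rw [pvSplitG_decomp [c] rest] at ih2
      constructor
      · intro p hp
        rcases List.mem_cons.mp hp with h | h
        · subst h
          intro hmem
          rcases List.mem_cons.mp hmem with h' | h'
          · exact hx h'.symm
          · exact ih1 _ (by rw [pvSplitG_decomp [c] rest]; exact List.mem_cons_self) h'
        · exact ih1 p (by rw [pvSplitG_decomp [c] rest]; exact List.mem_cons_of_mem _ h)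
      · cases htl : (pvSplitG [c] rest).tail with
        | nil =>
          rw [htl] at ih2
          simp only [pvJoinC] at ih2
          simp only [htl, pvJoinC]
          rw [ih2]
        | cons q qs =>
          rw [htl] at ih2
          simp only [pvJoinC] at ih2 ⊢
          rw [List.cons_append, ih2]

theorem pvChar_two (c : Char) (n a b : List Char) (h : pvSplitG [c] n = [a, b]) :
    n = a ++ c :: b ∧ c ∉ a ∧ c ∉ b := by
  obtain ⟨h1, h2⟩ := pvChar_parts c n
  rw [h] at h1 h2
  simp only [pvJoinC] at h2
  exact ⟨h2.symm, h1 a (by simp), h1 b (by simp)⟩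

theorem pvSplitG_headD_prefix (sep l) : (pvSplitG sep l).headD [] <+: l := by
  induction l with
  | nil => simp [pvSplitG]
  | cons x rest ih =>
    by_cases hx : (sep.isPrefixOf (x :: rest) && !sep.isEmpty) = true
    · obtain ⟨hx1, hx2⟩ := Bool.and_eq_true_iff.mp hx
      rw [pvSplitG_cons_pos sep x rest hx1 (by simpa using hx2)]
      simp
    · rw [pvSplitG_cons_neg sep x rest (by simpa using hx)]
      have : x :: (pvSplitG sep rest).headD [] <+: x :: rest :=
        List.cons_prefix_cons.mpr ⟨rfl, ih⟩
      simpa using this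

theorem pvTakeWhile_append (p : Char → Bool) (a : List Char) (y : Char) (t : List Char)
    (ha : ∀ x ∈ a, p x = true) (hy : p y = false) :
    (a ++ y :: t).takeWhile p = a ∧ (a ++ y :: t).dropWhile p = y :: t := by
  induction a with
  | nil => simp [List.takeWhile_cons, List.dropWhile_cons, hy]
  | cons x a' ih =>
    have hx : p x = true := ha x List.mem_cons_self
    have ih' := ih (fun z hz => ha z (List.mem_cons_of_mem _ hz))
    simp [List.takeWhile_cons, List.dropWhile_cons, hx, ih'.1, ih'.2]

theorem pvDropWhile_head (p : Char → Bool) (l : List Char) (y : Char) (ys : List Char)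
    (h : l.dropWhile p = y :: ys) : p y = false := by
  induction l with
  | nil => cases h
  | cons x xs ih =>
    rw [List.dropWhile_cons] at h
    by_cases hx : p x = true
    · rw [if_pos hx] at h; exact ih h
    · rw [if_neg hx] at h
      injection h with h1 h2
      subst h1
      simpa using hx

theorem pvIsdigit_ne (c : Char) (h : PySem.Chars.isdigit c = true) :
    c ≠ ',' ∧ c ≠ ')' ∧ c ≠ 'm' := by
  refine ⟨?_, ?_, ?_⟩ <;> (rintro rfl; revert h; decide)

theorem pvMul_prefix (c : Char) (rest : List Char)
    (h : List.isPrefixOf ['m', 'u', 'l', '('] (c :: rest) = true) :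
    c = 'm' ∧ rest = 'u' :: 'l' :: '(' :: rest.drop 3 := by
  rw [List.isPrefixOf_iff_prefix] at h
  obtain ⟨t, ht⟩ := h
  simp only [List.cons_append, List.nil_append] at ht
  injection ht with h1 h2
  subst h2
  exact ⟨h1.symm, by simp⟩

theorem pvScan_nonm (pre t : List Char) (h : ∀ x ∈ pre, x ≠ 'm') :
    pvScan (pre ++ t) = pvScan t := by
  induction pre with
  | nil => simp
  | cons x pre' ih =>
    have hx : x ≠ 'm' := h x List.mem_cons_self
    rw [List.cons_append, pvScan]
    rw [if_neg (by simp [List.isPrefixOf]; exact fun e => absurd e.symm hx)]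
    exact ih (fun z hz => h z (List.mem_cons_of_mem _ hz))

theorem pvSplitG_nonm (pre t : List Char) (h : ∀ x ∈ pre, x ≠ 'm') :
    pvSplitG ['m', 'u', 'l', '('] (pre ++ t)
      = (pre ++ (pvSplitG ['m', 'u', 'l', '('] t).headD [])
          :: (pvSplitG ['m', 'u', 'l', '('] t).tail := by
  induction pre with
  | nil =>
    simp only [List.nil_append]
    exact pvSplitG_decomp _ t
  | cons x pre' ih =>
    have hx : x ≠ 'm' := h x List.mem_cons_self
    rw [List.cons_append,
        pvSplitG_cons_neg _ x (pre' ++ t)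
          (by simp [List.isPrefixOf]; exact fun e => absurd e.symm hx)]
    rw [ih (fun z hz => h z (List.mem_cons_of_mem _ hz))]
    simp


-- A's per-entry contribution
def pvNums (entry : List Char) : List Char := (PySem.Chars.splitOn entry [')']).headD []
def pvNs (entry : List Char) : List (List Char) := PySem.Chars.splitOn (pvNums entry) [',']

def pvVal (entry : List Char) : Int :=
  if PySem.Chars.isIn [')'] entry = false then 0
  else if PySem.Chars.isIn [','] (pvNums entry) = false then 0
  else if (pvNs entry).length ≠ 2 then 0
  else if !(PySem.Chars.strIsdigit ((pvNs entry).headD []) && PySem.Chars.strIsdigit ((pvNs entry).getD 1 [])) then 0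
  else ((PySem.Int.ofChars? ((pvNs entry).headD [])).getD 0) * ((PySem.Int.ofChars? ((pvNs entry).getD 1 [])).getD 0)

def pvSum (l : List (List Char)) : Int := (l.map pvVal).sum

theorem pvSum_cons (e : List Char) (l : List (List Char)) :
    pvSum (e :: l) = pvVal e + pvSum l := by simp [pvSum]

theorem pvFold (l : List (List Char)) : ∀ m : Int,
    l.foldl (fun mul entry =>
      if PySem.Chars.isIn [')'] entry = false then mul
      else
        let numbers := (PySem.Chars.splitOn entry [')']).headD []
        if PySem.Chars.isIn [','] numbers = false then mul
        else
          let ns := PySem.Chars.splitOn numbers [',']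
          if ns.length ≠ 2 then mul
          else if !(PySem.Chars.strIsdigit (ns.headD []) && PySem.Chars.strIsdigit (ns.getD 1 [])) then mul
          else mul + ((PySem.Int.ofChars? (ns.headD [])).getD 0) * ((PySem.Int.ofChars? (ns.getD 1 [])).getD 0)) m
      = m + pvSum l := by
  induction l with
  | nil => intro m; simp [pvSum]
  | cons e l ih =>
    intro m
    rw [List.foldl_cons, ih, pvSum_cons]
    simp only [pvVal, pvNums, pvNs]
    split_ifs <;> ring

theorem pvStrIsdigit (a : List Char) (ha : a ≠ [])
    (hda : ∀ x ∈ a, PySem.Chars.isdigit x = true) :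
    PySem.Chars.strIsdigit a = true := by
  simp [PySem.Chars.strIsdigit, List.isEmpty_eq_false_iff.mpr ha, List.all_eq_true]
  exact hda

theorem pvVal_shape (a b t : List Char) (ha : a ≠ []) (hb : b ≠ [])
    (hda : ∀ x ∈ a, PySem.Chars.isdigit x = true)
    (hdb : ∀ x ∈ b, PySem.Chars.isdigit x = true) :
    pvVal (a ++ ',' :: (b ++ ')' :: t))
      = (PySem.Int.ofChars? a).getD 0 * (PySem.Int.ofChars? b).getD 0 := by
  have hcomma_a : ',' ∉ a := fun hm => (pvIsdigit_ne _ (hda _ hm)).1 rfl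
  have hcomma_b : ',' ∉ b := fun hm => (pvIsdigit_ne _ (hdb _ hm)).1 rfl
  have hparen_n : ')' ∉ a ++ ',' :: b := by
    intro hm
    rcases List.mem_append.mp hm with hm | hm
    · exact (pvIsdigit_ne _ (hda _ hm)).2.1 rfl
    · rcases List.mem_cons.mp hm with hm | hm
      · exact absurd hm (by decide)
      · exact (pvIsdigit_ne _ (hdb _ hm)).2.1 rfl
  have h1 : PySem.Chars.isIn [')'] (a ++ ',' :: (b ++ ')' :: t)) = true := by
    rw [PySem.Chars.isIn_iff_infix]
    exact ⟨a ++ ',' :: b, t, by simp⟩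
  have h2 : PySem.Chars.isIn [','] (a ++ ',' :: b) = true := by
    rw [PySem.Chars.isIn_iff_infix]
    exact ⟨a, b, by simp⟩
  have hsplit2 : PySem.Chars.splitOn (a ++ ',' :: b) [','] = [a, b] := by
    rw [splitOn_eq _ _ (by simp), pvChar_append _ _ _ hcomma_a, pvChar_no_mem _ _ hcomma_b]
  have hnums : pvNums (a ++ ',' :: (b ++ ')' :: t)) = a ++ ',' :: b := by
    unfold pvNums
    rw [show a ++ ',' :: (b ++ ')' :: t) = (a ++ ',' :: b) ++ ')' :: t by simp]
    rw [splitOn_eq _ _ (by simp), pvChar_append _ _ _ hparen_n]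
    simp
  have hns : pvNs (a ++ ',' :: (b ++ ')' :: t)) = [a, b] := by
    unfold pvNs
    rw [hnums, hsplit2]
  rw [pvVal, hnums, hns]
  simp [h1, h2, pvStrIsdigit a ha hda, pvStrIsdigit b hb hdb]

theorem pvVal_shape_inv (e : List Char) (h : pvVal e ≠ 0) :
    ∃ a b t, e = a ++ ',' :: (b ++ ')' :: t) ∧ a ≠ [] ∧ b ≠ [] ∧
      (∀ x ∈ a, PySem.Chars.isdigit x = true) ∧ (∀ x ∈ b, PySem.Chars.isdigit x = true) := by
  unfold pvVal at h
  split_ifs at h with h1 h2 h3 h4 <;> try (exact absurd rfl h)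
  rw [Bool.not_eq_false] at h1 h2
  have hnum : pvNums e = e.takeWhile (· != ')') := by
    unfold pvNums
    rw [splitOn_eq _ _ (by simp), pvChar_head]
  have hmem : ')' ∈ e := by
    obtain ⟨s1, t1, hst⟩ := (PySem.Chars.isIn_iff_infix _ _).mp h1
    rw [← hst]; simp
  cases hdc : e.dropWhile (· != ')') with
  | nil =>
    exfalso
    have htd := List.takeWhile_append_dropWhile (p := (· != ')')) (l := e)
    rw [hdc, List.append_nil] at htd
    have hmem' : ')' ∈ List.takeWhile (fun x => x != ')') e := by rw [htd]; exact hmem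
    have := List.mem_takeWhile_imp hmem'
    simp at this
  | cons y ys =>
    have hy : ((fun x => x != ')') y) = false := pvDropWhile_head (fun x => x != ')') e y ys hdc
    have hy' : y = ')' := by simpa using hy
    subst hy'
    have he : e = e.takeWhile (· != ')') ++ ')' :: ys := by
      conv_lhs => rw [← List.takeWhile_append_dropWhile (p := (· != ')')) (l := e)]
      rw [hdc]
    rw [Decidable.not_not] at h3
    obtain ⟨n0, n1, hns⟩ := List.length_eq_two.mp h3
    have hns' : pvSplitG [','] (e.takeWhile (· != ')')) = [n0, n1] := by
      rw [← hnum, ← splitOn_eq _ _ (by simp)]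
      exact hns
    obtain ⟨hjoin, -, -⟩ := pvChar_two ',' _ n0 n1 hns'
    rw [hns] at h4
    simp at h4
    obtain ⟨hd0, hd1⟩ := h4
    unfold PySem.Chars.strIsdigit at hd0 hd1
    obtain ⟨hne0, hall0⟩ := Bool.and_eq_true_iff.mp hd0
    obtain ⟨hne1, hall1⟩ := Bool.and_eq_true_iff.mp hd1
    refine ⟨n0, n1, ys, ?_, ?_, ?_, ?_, ?_⟩
    · rw [he, hjoin]; simp
    · simpa using hne0
    · simpa using hne1
    · simpa [List.all_eq_true] using hall0
    · simpa [List.all_eq_true] using hall1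

theorem pvParseNum_some {cs : List Char} {v : Int} {r : List Char}
    (h : pvParseNum cs = some (v, r)) :
    ∃ d, cs = d ++ r ∧ d ≠ [] ∧ (∀ x ∈ d, PySem.Chars.isdigit x = true) ∧
      v = (PySem.Int.ofChars? d).getD 0 := by
  unfold pvParseNum at h
  split at h
  · cases h
  · rename_i hne
    simp only [Option.some.injEq, Prod.mk.injEq] at h
    obtain ⟨hv, hr⟩ := h
    refine ⟨cs.takeWhile PySem.Chars.isdigit, ?_, by simpa using hne, ?_, hv.symm⟩
    · rw [← hr]
      exact (List.takeWhile_append_dropWhile ..).symm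
    · intro x hx
      exact List.mem_takeWhile_imp hx

theorem pvParseArgs_some {cs : List Char} {v : Int} {r : List Char}
    (h : pvParseArgs cs = some (v, r)) :
    ∃ a b, cs = a ++ ',' :: (b ++ ')' :: r) ∧ a ≠ [] ∧ b ≠ [] ∧
      (∀ x ∈ a, PySem.Chars.isdigit x = true) ∧ (∀ x ∈ b, PySem.Chars.isdigit x = true) ∧
      v = (PySem.Int.ofChars? a).getD 0 * (PySem.Int.ofChars? b).getD 0 := by
  unfold pvParseArgs at h
  split at h
  · cases h
  · rename_i a0 r1 hp1
    obtain ⟨a, hcs, haNe, haDig, hva⟩ := pvParseNum_some hp1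
    split at h
    · rename_i r2
      split at h
      · cases h
      · rename_i b0 r3 hp2
        obtain ⟨b, hr2, hbNe, hbDig, hvb⟩ := pvParseNum_some hp2
        split at h
        · rename_i r4
          simp only [Option.some.injEq, Prod.mk.injEq] at h
          obtain ⟨hv, hr⟩ := h
          subst hr
          refine ⟨a, b, ?_, haNe, hbNe, haDig, hbDig, by rw [← hv, hva, hvb]⟩
          rw [hcs, hr2]
        · cases h
    · cases h

theorem pvParseArgs_build (a b r : List Char) (ha : a ≠ []) (hb : b ≠ [])
    (hda : ∀ x ∈ a, PySem.Chars.isdigit x = true)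
    (hdb : ∀ x ∈ b, PySem.Chars.isdigit x = true) :
    pvParseArgs (a ++ ',' :: (b ++ ')' :: r))
      = some ((PySem.Int.ofChars? a).getD 0 * (PySem.Int.ofChars? b).getD 0, r) := by
  have h1 := pvTakeWhile_append PySem.Chars.isdigit a ',' (b ++ ')' :: r) hda (by decide)
  have h2 := pvTakeWhile_append PySem.Chars.isdigit b ')' r hdb (by decide)
  simp [pvParseArgs, pvParseNum, h1.1, h1.2, h2.1, h2.2,
        List.isEmpty_eq_false_iff.mpr ha, List.isEmpty_eq_false_iff.mpr hb]

theorem pvScan_splits : ∀ (n : Nat) (cs : List Char), cs.length ≤ n →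
    pvScan cs = pvSum ((pvSplitG ['m', 'u', 'l', '('] cs).tail) := by
  intro n
  induction n with
  | zero =>
    intro cs h
    have hnil : cs = [] := List.eq_nil_of_length_eq_zero (Nat.le_zero.mp h)
    subst hnil
    simp [pvScan, pvSplitG, pvSum]
  | succ n ih =>
    intro cs hlen
    cases cs with
    | nil => simp [pvScan, pvSplitG, pvSum]
    | cons c rest =>
      rw [pvScan]
      by_cases hp : List.isPrefixOf ['m', 'u', 'l', '('] (c :: rest) = true
      · obtain ⟨hc, hrest⟩ := pvMul_prefix c rest hp
        subst hc
        rw [if_pos hp]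
        set t := rest.drop 3 with hteq
        have hrest_len : rest.length ≤ n := by simpa using hlen
        have htlen : t.length ≤ n := by rw [hteq]; simp only [List.length_drop]; omega
        have hsplitl : pvSplitG ['m', 'u', 'l', '('] ('m' :: rest)
            = [] :: pvSplitG ['m', 'u', 'l', '('] t := by
          rw [pvSplitG_cons_pos _ _ _ hp (by simp)]
          rw [hrest]
          simp
        rw [hsplitl, List.tail_cons]
        split
        · rename_i v r heq
          obtain ⟨a, b, ht, haNe, hbNe, haDig, hbDig, hv⟩ := pvParseArgs_some heq
          have hpre : ∀ x ∈ a ++ ',' :: (b ++ [')']), x ≠ 'm' := by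
            intro x hx
            rcases List.mem_append.mp hx with hx | hx
            · exact (pvIsdigit_ne _ (haDig _ hx)).2.2
            · rcases List.mem_cons.mp hx with hx | hx
              · subst hx; decide
              · rcases List.mem_append.mp hx with hx | hx
                · exact (pvIsdigit_ne _ (hbDig _ hx)).2.2
                · rw [List.mem_singleton] at hx; subst hx; decide
          have ht' : t = (a ++ ',' :: (b ++ [')'])) ++ r := by rw [ht]; simp
          rw [ht', pvSplitG_nonm _ _ hpre, pvSum_cons]
          have hassoc : (a ++ ',' :: (b ++ [')'])) ++ (pvSplitG ['m', 'u', 'l', '('] r).headD []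
              = a ++ ',' :: (b ++ ')' :: (pvSplitG ['m', 'u', 'l', '('] r).headD []) := by simp
          rw [hassoc, pvVal_shape a b _ haNe hbNe haDig hbDig]
          have hrlen : r.length ≤ n := by
            have := pvParseArgs_length heq
            omega
          rw [ih r hrlen, hv]
        · rename_i heq
          have h5 : ('u' :: 'l' :: '(' :: t) = ['u', 'l', '('] ++ t := rfl
          have hulp : ∀ x ∈ ['u', 'l', '('], x ≠ 'm' := by
            intro x hx
            fin_cases hx <;> decide
          rw [hrest, h5, pvScan_nonm _ _ hulp, ih t htlen]
          conv_rhs => rw [pvSplitG_decomp ['m', 'u', 'l', '('] t]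
          rw [pvSum_cons]
          have hval0 : pvVal ((pvSplitG ['m', 'u', 'l', '('] t).headD []) = 0 := by
            by_contra hv0
            obtain ⟨a, b, t', hsh, haNe, hbNe, haDig, hbDig⟩ := pvVal_shape_inv _ hv0
            obtain ⟨q, hq⟩ := pvSplitG_headD_prefix ['m', 'u', 'l', '('] t
            rw [hsh] at hq
            have ht2 : t = a ++ ',' :: (b ++ ')' :: (t' ++ q)) := by rw [← hq]; simp
            rw [ht2, pvParseArgs_build a b (t' ++ q) haNe hbNe haDig hbDig] at heq
            cases heq
          rw [hval0]
          ring
      · rw [if_neg hp]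
        rw [pvSplitG_cons_neg _ _ _ (by simp [hp]), List.tail_cons]
        have hrest_len : rest.length ≤ n := by simpa using hlen
        exact ih rest hrest_len

theorem pvMatch_of_shape (a b t : List Char) (ha : a ≠ []) (hb : b ≠ [])
    (hda : ∀ x ∈ a, PySem.Chars.isdigit x = true)
    (hdb : ∀ x ∈ b, PySem.Chars.isdigit x = true)
    (hprod : (PySem.Int.ofChars? a).getD 0 * (PySem.Int.ofChars? b).getD 0 ≠ 0) :
    pvMatchAB (a ++ ',' :: (b ++ ')' :: t)) = true := by
  have h1 := pvTakeWhile_append PySem.Chars.isdigit a ',' (b ++ ')' :: t) hda (by decide)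
  have h2 := pvTakeWhile_append PySem.Chars.isdigit b ')' t hdb (by decide)
  rw [pvMatchAB]
  simp only [h1.1, h1.2, List.tail_cons, h2.1, h2.2]
  simp [hprod]

theorem pvMatch_inv (cs : List Char) (h : pvMatchAB cs = true) :
    ∃ a b t, cs = a ++ ',' :: (b ++ ')' :: t) ∧ a ≠ [] ∧ b ≠ [] ∧
      (∀ x ∈ a, PySem.Chars.isdigit x = true) ∧ (∀ x ∈ b, PySem.Chars.isdigit x = true) ∧
      (PySem.Int.ofChars? a).getD 0 * (PySem.Int.ofChars? b).getD 0 ≠ 0 := by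
  rw [pvMatchAB] at h
  simp only [Bool.and_eq_true, beq_iff_eq, bne_iff_ne, ne_eq] at h
  obtain ⟨⟨hc, hp⟩, hprod⟩ := h
  have haNe : cs.takeWhile PySem.Chars.isdigit ≠ [] := by
    intro he
    rw [he] at hprod
    exact hprod (by norm_num [show PySem.Int.ofChars? ([] : List Char) = none from by decide])
  have hcs : cs = cs.takeWhile PySem.Chars.isdigit ++ cs.dropWhile PySem.Chars.isdigit :=
    (List.takeWhile_append_dropWhile ..).symm
  cases hr1 : cs.dropWhile PySem.Chars.isdigit with
  | nil => rw [hr1] at hc; simp at hc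
  | cons y r2 =>
    rw [hr1] at hc
    simp only [List.headD_cons] at hc
    subst hc
    rw [hr1, List.tail_cons] at hp hprod
    have hbNe : r2.takeWhile PySem.Chars.isdigit ≠ [] := by
      intro he
      rw [he] at hprod
      exact hprod (by norm_num [show PySem.Int.ofChars? ([] : List Char) = none from by decide])
    have hr2 : r2 = r2.takeWhile PySem.Chars.isdigit ++ r2.dropWhile PySem.Chars.isdigit :=
      (List.takeWhile_append_dropWhile ..).symm
    cases hr3 : r2.dropWhile PySem.Chars.isdigit with
    | nil => rw [hr3] at hp; simp at hp
    | cons z t =>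
      rw [hr3] at hp
      simp only [List.headD_cons] at hp
      subst hp
      refine ⟨cs.takeWhile PySem.Chars.isdigit, r2.takeWhile PySem.Chars.isdigit, t,
        ?_, haNe, hbNe, ?_, ?_, hprod⟩
      · conv_lhs => rw [hcs, hr1]
        have hr2' : r2 = List.takeWhile PySem.Chars.isdigit r2 ++ ')' :: t := by
          conv_lhs => rw [hr2, hr3]
        exact congrArg (List.takeWhile PySem.Chars.isdigit cs ++ ·)
          (congrArg (',' :: ·) hr2')
      · intro x hx; exact List.mem_takeWhile_imp hx
      · intro x hx; exact List.mem_takeWhile_imp hx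

theorem pvShape_no_m (a b : List Char)
    (hda : ∀ x ∈ a, PySem.Chars.isdigit x = true)
    (hdb : ∀ x ∈ b, PySem.Chars.isdigit x = true) :
    ∀ x ∈ a ++ ',' :: (b ++ [')']), x ≠ 'm' := by
  intro x hx
  rcases List.mem_append.mp hx with hx | hx
  · exact (pvIsdigit_ne _ (hda _ hx)).2.2
  · rcases List.mem_cons.mp hx with hx | hx
    · subst hx; decide
    · rcases List.mem_append.mp hx with hx | hx
      · exact (pvIsdigit_ne _ (hdb _ hx)).2.2
      · rw [List.mem_singleton] at hx; subst hx; decide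

theorem pvPart1_decomp (s : String) (cs' : List String) :
    part_1 (s :: cs')
      = pvVal ((pvSplitG ['m', 'u', 'l', '('] s.toList).headD []) + part_1_alt (s :: cs') := by
  have hg : PySem.List.pyGet? (s :: cs') 0 = some s := PySem.List.pyGet?_zero_cons s cs'
  have hsep : "mul(".toList = ['m', 'u', 'l', '('] := by decide
  simp only [part_1, part_1_alt, hg]
  rw [pvFold, hsep, splitOn_eq _ _ (by simp)]
  rw [pvScan_splits s.toList.length s.toList le_rfl]
  conv_lhs => rw [pvSplitG_decomp ['m', 'u', 'l', '('] s.toList]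
  rw [pvSum_cons]
  ring

-- ===== VERDICT (by name: the statement is the Claim_ definition above) =====
theorem part_1_spec : Claim_unchanged_part_1 := by
  unfold Claim_unchanged_part_1
  intro contents hdom hpre
  unfold Spec_part_1
  intro hnd
  cases contents with
  | nil => exact absurd rfl hpre
  | cons s cs' =>
    rw [pvPart1_decomp]
    have hval0 : pvVal ((pvSplitG ['m', 'u', 'l', '('] s.toList).headD []) = 0 := by
      by_contra hv0
      obtain ⟨a, b, t', hsh, haNe, hbNe, haDig, hbDig⟩ := pvVal_shape_inv _ hv0
      obtain ⟨q, hq⟩ := pvSplitG_headD_prefix ['m', 'u', 'l', '('] s.toList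
      rw [hsh] at hq
      have hs2 : s.toList = a ++ ',' :: (b ++ ')' :: (t' ++ q)) := by rw [← hq]; simp
      have hprod : (PySem.Int.ofChars? a).getD 0 * (PySem.Int.ofChars? b).getD 0 ≠ 0 := by
        rw [hsh, pvVal_shape a b t' haNe hbNe haDig hbDig] at hv0
        exact hv0
      exact hnd ⟨by simp, by
        simpa using hs2 ▸ pvMatch_of_shape a b (t' ++ q) haNe hbNe haDig hbDig hprod⟩
    rw [hval0, zero_add]

theorem part_1_changed : Claim_changed_part_1 := by
  unfold Claim_changed_part_1
  refine ⟨by decide, by decide, by decide, by decide, ?_, by decide⟩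
  show part_1_alt ["1,2)"] = 0
  simp [part_1_alt, pvScan]

theorem part_1_tight : Claim_exact_part_1 := by
  unfold Claim_exact_part_1
  intro contents hdom hpre hd
  cases contents with
  | nil => exact absurd rfl hpre
  | cons s cs' =>
    obtain ⟨-, hm⟩ := hd
    rw [List.headD_cons] at hm
    obtain ⟨a, b, t, hs2, haNe, hbNe, haDig, hbDig, hprod⟩ := pvMatch_inv _ hm
    rw [pvPart1_decomp]
    have hs2' : s.toList = (a ++ ',' :: (b ++ [')'])) ++ t := by rw [hs2]; simp
    have hsplit := pvSplitG_nonm (a ++ ',' :: (b ++ [')'])) t (pvShape_no_m a b haDig hbDig)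
    rw [hs2', hsplit, List.headD_cons]
    have hassoc : (a ++ ',' :: (b ++ [')'])) ++ (pvSplitG ['m', 'u', 'l', '('] t).headD []
        = a ++ ',' :: (b ++ ')' :: (pvSplitG ['m', 'u', 'l', '('] t).headD []) := by simp
    rw [hassoc, pvVal_shape a b _ haNe hbNe haDig hbDig]
    intro habs
    omega
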